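-- pv_equiv track=rewrite | github.com/7beniamin/tevelgoVisionDashboard | main.py | process_vehicle_stats
-- ===== SOURCE A (Python) =====
-- def process_vehicle_stats(logs):
--     stats = {"success": 0, "failed": 0, "mismatch": 0}
--     for log in logs:
--         make_status = (log.get("car_make_status") or "").lower()
--         model_status = (log.get("car_model_status") or "").lower()
--         status = (log.get("output") or log.get("status") or "").lower()
--
--         # Final outcome (only Authorized/Unauthorized)
--         if status == "authorized":
--             stats["success"] += 1
--             if make_status == "mismatch" or model_status == "mismatch":
--                 stats["mismatch"] += 1
--         elif status == "unauthorized":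
--             stats["failed"] += 1
--             if make_status == "mismatch" or model_status == "mismatch":
--                 stats["mismatch"] += 1
--     return stats
-- ===== SOURCE B (Python) =====
-- def process_vehicle_stats(logs):
--     def status(log):
--         return (log.get("output") or log.get("status") or "").lower()
--
--     def mismatched(log):
--         return ((log.get("car_make_status") or "").lower() == "mismatch"
--                 or (log.get("car_model_status") or "").lower() == "mismatch")
--
--     return {
--         "success": sum(1 for log in logs if status(log) == "authorized"),
--         "failed": sum(1 for log in logs if status(log) == "unauthorized"),
--         "mismatch": sum(1 for log in logs
--                         if status(log) in ("authorized", "unauthorized") and mismatched(log)),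
--     }
-- ===== Notes on version B (the rewrite author's own statement) =====
-- stated objective: alternative
-- what changed: Replaced the single branching dict-accumulator loop with three independent generator-expression counts (success, failed, mismatch) assembled into the result dict at the end.
import Mathlib
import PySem

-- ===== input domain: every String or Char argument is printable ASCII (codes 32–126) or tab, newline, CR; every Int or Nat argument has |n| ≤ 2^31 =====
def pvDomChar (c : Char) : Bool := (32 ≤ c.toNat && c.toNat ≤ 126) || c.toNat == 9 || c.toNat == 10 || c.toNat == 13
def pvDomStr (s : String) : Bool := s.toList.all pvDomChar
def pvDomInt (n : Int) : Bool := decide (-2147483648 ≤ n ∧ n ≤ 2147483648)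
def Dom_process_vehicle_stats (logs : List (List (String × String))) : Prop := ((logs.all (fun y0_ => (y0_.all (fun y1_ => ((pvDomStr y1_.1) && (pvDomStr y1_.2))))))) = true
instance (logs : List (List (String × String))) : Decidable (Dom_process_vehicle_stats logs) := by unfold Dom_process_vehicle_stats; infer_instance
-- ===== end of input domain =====

-- B replaces A's single branching dict-accumulator loop with three independent counts; alternative decomposition, same cost.

-- ===== PORT A =====
-- one iteration of A's loop body over the stats dict
def pvStepA (stats : PySem.Dict String Int) (log : List (String × String)) : PySem.Dict String Int :=
  let d := PySem.Dict.ofList log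
  let make_status := PySem.Str.lower (d.getD "car_make_status" "")
  let model_status := PySem.Str.lower (d.getD "car_model_status" "")
  -- (log.get("output") or log.get("status") or ""): None and "" both fall through
  let o := d.getD "output" ""
  let status := PySem.Str.lower (if o ≠ "" then o else d.getD "status" "")
  if status = "authorized" then
    let stats := stats.insert "success" (stats.getD "success" 0 + 1)
    if make_status = "mismatch" ∨ model_status = "mismatch" then
      stats.insert "mismatch" (stats.getD "mismatch" 0 + 1)
    else stats
  else if status = "unauthorized" then
    let stats := stats.insert "failed" (stats.getD "failed" 0 + 1)
    if make_status = "mismatch" ∨ model_status = "mismatch" then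
      stats.insert "mismatch" (stats.getD "mismatch" 0 + 1)
    else stats
  else stats

def process_vehicle_stats (logs : List (List (String × String))) : List (String × Int) :=
  (logs.foldl pvStepA (PySem.Dict.ofList [("success", 0), ("failed", 0), ("mismatch", 0)])).items

-- ===== PORT B =====
def pvStatus (log : List (String × String)) : String :=
  let d := PySem.Dict.ofList log
  let o := d.getD "output" ""
  PySem.Str.lower (if o ≠ "" then o else d.getD "status" "")

def pvMismatched (log : List (String × String)) : Bool :=
  let d := PySem.Dict.ofList log
  PySem.Str.lower (d.getD "car_make_status" "") == "mismatch"
    || PySem.Str.lower (d.getD "car_model_status" "") == "mismatch"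

def process_vehicle_stats_alt (logs : List (List (String × String))) : List (String × Int) :=
  [("success", (logs.countP (fun l => pvStatus l == "authorized") : Int)),
   ("failed", (logs.countP (fun l => pvStatus l == "unauthorized") : Int)),
   ("mismatch", (logs.countP (fun l =>
      (pvStatus l == "authorized" || pvStatus l == "unauthorized") && pvMismatched l) : Int))]

-- ===== PRECONDITION & SPEC =====
def Spec_process_vehicle_stats (logs : List (List (String × String))) (out : List (String × Int)) : Prop := out = process_vehicle_stats_alt logs
instance (logs : List (List (String × String))) (out : List (String × Int)) : Decidable (Spec_process_vehicle_stats logs out) := by unfold Spec_process_vehicle_stats; infer_instance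

-- ===== CLAIM (what is proved, stated in full; the proofs are below) =====
def Claim_equal_process_vehicle_stats : Prop := ∀ (logs : List (List (String × String))), Dom_process_vehicle_stats logs → Spec_process_vehicle_stats logs (process_vehicle_stats logs)

-- ===== LEMMAS AND PROOFS =====
theorem pv_loop_invariant (logs : List (List (String × String))) (s f m : Int) :
    (logs.foldl pvStepA (PySem.Dict.mk [("success", s), ("failed", f), ("mismatch", m)])).items
    = [("success", s + (logs.countP (fun l => pvStatus l == "authorized") : Int)),
       ("failed", f + (logs.countP (fun l => pvStatus l == "unauthorized") : Int)),
       ("mismatch", m + (logs.countP (fun l =>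
          (pvStatus l == "authorized" || pvStatus l == "unauthorized") && pvMismatched l) : Int))] := by
  induction logs generalizing s f m with
  | nil => simp
  | cons log rest ih =>
    simp only [List.foldl_cons]
    have hstep : pvStepA (PySem.Dict.mk [("success", s), ("failed", f), ("mismatch", m)]) log
        = PySem.Dict.mk
            [("success", s + if pvStatus log == "authorized" then 1 else 0),
             ("failed", f + if pvStatus log == "unauthorized" then 1 else 0),
             ("mismatch", m + if (pvStatus log == "authorized" || pvStatus log == "unauthorized")
                                && pvMismatched log then 1 else 0)] := by
      simp only [pvStepA, pvStatus, pvMismatched, PySem.Dict.insert, PySem.Dict.getD,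
        PySem.Dict.get?]
      by_cases h1 : PySem.Str.lower (if (PySem.Dict.ofList log).getD "output" "" ≠ ""
          then (PySem.Dict.ofList log).getD "output" ""
          else (PySem.Dict.ofList log).getD "status" "") = "authorized" <;>
      by_cases h2 : PySem.Str.lower (if (PySem.Dict.ofList log).getD "output" "" ≠ ""
          then (PySem.Dict.ofList log).getD "output" ""
          else (PySem.Dict.ofList log).getD "status" "") = "unauthorized" <;>
      by_cases h3 : PySem.Str.lower ((PySem.Dict.ofList log).getD "car_make_status" "") = "mismatch"
          ∨ PySem.Str.lower ((PySem.Dict.ofList log).getD "car_model_status" "") = "mismatch" <;>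
      simp_all [PySem.Dict.getD, PySem.Dict.get?]
    rw [hstep, ih]
    simp only [List.countP_cons]
    by_cases ha : (pvStatus log == "authorized") = true <;>
    by_cases hb : (pvStatus log == "unauthorized") = true <;>
    by_cases hc : pvMismatched log = true <;>
    simp_all <;> try ring_nf
    all_goals exact ⟨trivial, trivial⟩

-- ===== VERDICT (by name: the statement is the Claim_ definition above) =====
theorem process_vehicle_stats_spec : Claim_equal_process_vehicle_stats := by
  intro logs _
  unfold Spec_process_vehicle_stats process_vehicle_stats process_vehicle_stats_alt
  have h : PySem.Dict.ofList [("success", (0:Int)), ("failed", 0), ("mismatch", 0)]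
      = PySem.Dict.mk [("success", 0), ("failed", 0), ("mismatch", 0)] := by decide
  rw [h, pv_loop_invariant]
  simp
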